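-- pv_equiv track=rewrite | github.com/Dharshinisri2005/automataexam | q10.py | is_accepted_by_pda
-- ===== SOURCE A (Python) =====
-- def is_accepted_by_pda(string):
--     stack1 = []
--     stack2 = []
--     stage = 1
--
--     for symbol in string:
--         if stage == 1:
--             if symbol == '0':
--                 stack1.append('0')
--             elif symbol == '1':
--                 stack2.append('1')
--                 stage = 2
--             else:
--                 return False
--
--         elif stage == 2:
--             if symbol == '1':
--                 stack2.append('1')
--             elif symbol == '2':
--                 if stack2:
--                     stack2.pop()
--                 else:
--                     return False
--                 stage = 3
--             else:
--                 return False
--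
--         elif stage == 3:
--             if symbol == '2':
--                 if stack2:
--                     stack2.pop()
--                 else:
--                     return False
--             elif symbol == '3':
--                 if stack1:
--                     stack1.pop()
--                 else:
--                     return False
--                 stage = 4
--             else:
--                 return False
--
--         elif stage == 4:
--             if symbol == '3':
--                 if stack1:
--                     stack1.pop()
--                 else:
--                     return False
--             else:
--                 return False
--
--     return len(stack1) == 0 and len(stack2) == 0
-- ===== SOURCE B (Python) =====
-- def _run(string, i, ch):
--     n = 0
--     while i < len(string) and string[i] == ch:
--         n += 1
--         i += 1
--     return n, i
--
-- def is_accepted_by_pda(string):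
--     a, i = _run(string, 0, '0')
--     b, i = _run(string, i, '1')
--     c, i = _run(string, i, '2')
--     d, i = _run(string, i, '3')
--     if i != len(string):
--         return False
--     return a == d and b == c and (a == 0 or b > 0)
-- ===== Notes on version B (the rewrite author's own statement) =====
-- stated objective: simpler
-- what changed: Replaces the two-stack four-stage PDA simulation by counting the four runs 0^a1^b2^c3^d of the string and checking the closed-form condition a==d and b==c and (a==0 or b>0).
import Mathlib
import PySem

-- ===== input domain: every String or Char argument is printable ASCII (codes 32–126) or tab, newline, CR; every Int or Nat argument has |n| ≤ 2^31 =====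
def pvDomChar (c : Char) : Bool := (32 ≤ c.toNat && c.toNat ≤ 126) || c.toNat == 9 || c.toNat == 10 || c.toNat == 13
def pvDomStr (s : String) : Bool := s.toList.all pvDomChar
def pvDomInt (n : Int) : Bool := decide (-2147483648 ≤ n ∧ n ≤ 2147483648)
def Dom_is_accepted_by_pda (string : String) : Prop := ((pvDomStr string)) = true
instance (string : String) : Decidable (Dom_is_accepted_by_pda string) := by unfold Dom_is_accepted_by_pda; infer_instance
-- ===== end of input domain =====

-- B replaces A's two-stack four-stage PDA simulation by counting the four runs 0^a1^b2^c3^d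
-- of the string and checking the closed-form condition a = d ∧ b = c ∧ (a = 0 ∨ b > 0); objective: simpler.

-- ===== PORT A =====
-- A's for-loop with early return (= false), stacks as lists ('append' = ++ [·], 'pop' = dropLast)
def loopA : List Char → List Char → List Char → Nat → Bool
  | [], s1, s2, _ => s1.length == 0 && s2.length == 0
  | sym :: rest, s1, s2, stage =>
    if stage = 1 then
      if sym = '0' then loopA rest (s1 ++ ['0']) s2 stage
      else if sym = '1' then loopA rest s1 (s2 ++ ['1']) 2
      else false
    else if stage = 2 then
      if sym = '1' then loopA rest s1 (s2 ++ ['1']) stage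
      else if sym = '2' then (if s2.isEmpty then false else loopA rest s1 s2.dropLast 3)
      else false
    else if stage = 3 then
      if sym = '2' then (if s2.isEmpty then false else loopA rest s1 s2.dropLast stage)
      else if sym = '3' then (if s1.isEmpty then false else loopA rest s1.dropLast s2 4)
      else false
    else if stage = 4 then
      if sym = '3' then (if s1.isEmpty then false else loopA rest s1.dropLast s2 stage)
      else false
    else loopA rest s1 s2 stage   -- unreachable: no branch matches, Python's loop just continues

def is_accepted_by_pda (string : String) : Bool := loopA string.toList [] [] 1

-- ===== PORT B =====
-- B's `_run(string, i, ch)` while-loop: counts the run of `ch` from position i; advancing the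
-- index i over the string is exact to consuming a prefix of the remaining character list.
def runB : List Char → Char → Nat × List Char
  | [], _ => (0, [])
  | x :: xs, ch => if x = ch then let (n, r) := runB xs ch; (n + 1, r) else (0, x :: xs)

def is_accepted_by_pda_alt (string : String) : Bool :=
  let (a, r1) := runB string.toList '0'
  let (b, r2) := runB r1 '1'
  let (c, r3) := runB r2 '2'
  let (d, r4) := runB r3 '3'
  if r4 ≠ [] then false
  else decide (a = d) && decide (b = c) && (decide (a = 0) || decide (0 < b))

-- ===== PRECONDITION & SPEC =====
def Spec_is_accepted_by_pda (string : String) (out : Bool) : Prop := out = is_accepted_by_pda_alt string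
instance (string : String) (out : Bool) : Decidable (Spec_is_accepted_by_pda string out) := by unfold Spec_is_accepted_by_pda; infer_instance

-- ===== CLAIM (what is proved, stated in full; the proofs are below) =====
def Claim_equal_is_accepted_by_pda : Prop := ∀ (string : String), Dom_is_accepted_by_pda string → Spec_is_accepted_by_pda string (is_accepted_by_pda string)

-- ===== LEMMAS AND PROOFS =====

-- counter abstraction of A's loop: only the stack lengths matter
def loopAN : List Char → Nat → Nat → Nat → Bool
  | [], a, b, _ => a == 0 && b == 0
  | sym :: rest, a, b, stage =>
    if stage = 1 then
      if sym = '0' then loopAN rest (a + 1) b stage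
      else if sym = '1' then loopAN rest a (b + 1) 2
      else false
    else if stage = 2 then
      if sym = '1' then loopAN rest a (b + 1) stage
      else if sym = '2' then (if b = 0 then false else loopAN rest a (b - 1) 3)
      else false
    else if stage = 3 then
      if sym = '2' then (if b = 0 then false else loopAN rest a (b - 1) stage)
      else if sym = '3' then (if a = 0 then false else loopAN rest (a - 1) b 4)
      else false
    else if stage = 4 then
      if sym = '3' then (if a = 0 then false else loopAN rest (a - 1) b stage)
      else false
    else loopAN rest a b stage

theorem loopA_counts (l : List Char) : ∀ (s1 s2 : List Char) (stage : Nat),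
    loopA l s1 s2 stage = loopAN l s1.length s2.length stage := by
  induction l with
  | nil => intro s1 s2 stage; rfl
  | cons x xs ih =>
    intro s1 s2 stage
    simp only [loopA, loopAN, List.isEmpty_iff, List.length_eq_zero_iff]
    split_ifs <;> simp_all [ih]

theorem runB_eq_iff (ch : Char) : ∀ (l : List Char) (n : Nat),
    runB l ch = (n, []) ↔ l = List.replicate n ch := by
  intro l
  induction l with
  | nil => intro n; cases n <;> simp [runB, List.replicate]
  | cons x xs ih =>
    intro n
    by_cases hx : x = ch
    · subst hx
      obtain ⟨m, r, hmr⟩ : ∃ m r, runB xs x = (m, r) := ⟨_, _, rfl⟩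
      cases n with
      | zero => simp [runB, hmr, List.replicate]
      | succ k =>
        have h := ih k
        rw [hmr, Prod.ext_iff] at h
        simp [runB, hmr, List.replicate]
        exact h
    · cases n with
      | zero => simp [runB, hx, List.replicate]
      | succ k => simp [runB, hx, List.replicate]

theorem stage4 (l : List Char) : ∀ (a b : Nat),
    loopAN l a b 4 = (decide (b = 0) && decide (runB l '3' = (a, []))) := by
  induction l with
  | nil =>
    intro a b
    by_cases a0 : a = 0 <;> by_cases b0 : b = 0 <;>
      simp [loopAN, runB, a0, b0, Prod.ext_iff, eq_comm (a := (0:Nat))]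
  | cons x xs ih =>
    intro a b
    by_cases hx : x = '3'
    · subst hx
      obtain ⟨m, r, hmr⟩ : ∃ m r, runB xs '3' = (m, r) := ⟨_, _, rfl⟩
      cases a with
      | zero => simp [loopAN, runB, hmr, Prod.ext_iff]
      | succ k => simp [loopAN, runB, hmr, ih, Prod.ext_iff]
    · simp [loopAN, runB, hx, Prod.ext_iff]

theorem stage3 (l : List Char) : ∀ (a b : Nat),
    loopAN l a b 3 = decide (runB l '2' = (b, List.replicate a '3')) := by
  induction l with
  | nil =>
    intro a b
    cases a <;> by_cases b0 : b = 0 <;>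
      simp [loopAN, runB, b0, Prod.ext_iff, List.replicate, eq_comm (a := (0:Nat))]
  | cons x xs ih =>
    intro a b
    by_cases hx : x = '2'
    · subst hx
      obtain ⟨m, r, hmr⟩ : ∃ m r, runB xs '2' = (m, r) := ⟨_, _, rfl⟩
      cases b with
      | zero => simp [loopAN, runB, hmr, Prod.ext_iff]
      | succ k => simp [loopAN, runB, hmr, ih, Prod.ext_iff]
    · by_cases hx3 : x = '3'
      · subst hx3
        cases a with
        | zero => simp [loopAN, runB, List.replicate, Prod.ext_iff]
        | succ k =>
          have h := runB_eq_iff '3' xs k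
          rw [Prod.ext_iff] at h
          simp [loopAN, runB, stage4, List.replicate, Prod.ext_iff, h, eq_comm (a := (0:Nat))]
      · cases a with
        | zero =>
          simp [loopAN, runB, hx, hx3, Prod.ext_iff, List.replicate, eq_comm (a := (0:Nat))]
        | succ k =>
          simp [loopAN, runB, hx, hx3, Prod.ext_iff, List.replicate]

theorem stage2 (l : List Char) : ∀ (a b : Nat), 1 ≤ b →
    loopAN l a b 2 =
      decide (runB (runB l '1').2 '2' = (b + (runB l '1').1, List.replicate a '3')) := by
  induction l with
  | nil =>
    intro a b hb
    have hb0 : b ≠ 0 := by omega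
    simp [loopAN, runB, Prod.ext_iff, hb0, Ne.symm hb0]
  | cons x xs ih =>
    intro a b hb
    by_cases hx : x = '1'
    · subst hx
      obtain ⟨m, r, hmr⟩ : ∃ m r, runB xs '1' = (m, r) := ⟨_, _, rfl⟩
      have e : b + 1 + m = b + (m + 1) := by omega
      simp [loopAN, runB, hmr, ih _ (b + 1) (by omega), e]
    · by_cases hx2 : x = '2'
      · subst hx2
        cases b with
        | zero => omega
        | succ k =>
          obtain ⟨m, r, hmr⟩ : ∃ m r, runB xs '2' = (m, r) := ⟨_, _, rfl⟩
          simp [loopAN, runB, hmr, stage3, Prod.ext_iff]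
      · have h2 : runB (x :: xs) '2' = (0, x :: xs) := by simp [runB, hx2]
        simp [loopAN, runB, hx, hx2, h2, Prod.ext_iff]
        omega

-- after stage 1: either the string ended (accept iff no pending 0s), or a '1' starts stage 2
def core (a : Nat) : List Char → Bool
  | [] => a == 0
  | x :: xs => if x = '1' then loopAN xs a 1 2 else false

theorem stage1 (l : List Char) : ∀ (a : Nat),
    loopAN l a 0 1 = core (a + (runB l '0').1) (runB l '0').2 := by
  induction l with
  | nil => intro a; simp [loopAN, runB, core]
  | cons x xs ih =>
    intro a
    by_cases hx : x = '0'
    · subst hx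
      obtain ⟨m, r, hmr⟩ : ∃ m r, runB xs '0' = (m, r) := ⟨_, _, rfl⟩
      have e : a + 1 + m = a + (m + 1) := by omega
      have step : loopAN ('0' :: xs) a 0 1 = loopAN xs (a + 1) 0 1 := by simp [loopAN]
      have runstep : runB ('0' :: xs) '0' = (m + 1, r) := by simp [runB, hmr]
      rw [step, ih (a + 1), hmr, runstep, e]
    · by_cases hx1 : x = '1'
      · subst hx1
        simp [loopAN, runB, core]
      · simp [loopAN, runB, hx, hx1, core]

-- B's body on the character list (definitionally is_accepted_by_pda_alt)
def altCore (l : List Char) : Bool :=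
  let (a, r1) := runB l '0'
  let (b, r2) := runB r1 '1'
  let (c, r3) := runB r2 '2'
  let (d, r4) := runB r3 '3'
  if r4 ≠ [] then false
  else decide (a = d) && decide (b = c) && (decide (a = 0) || decide (0 < b))

theorem main_lemma (l : List Char) : loopAN l 0 0 1 = altCore l := by
  rw [stage1]
  obtain ⟨a, r1, h0⟩ : ∃ a r1, runB l '0' = (a, r1) := ⟨_, _, rfl⟩
  simp only [altCore, h0, Nat.zero_add]
  cases r1 with
  | nil => by_cases a0 : a = 0 <;> simp [core, runB, a0]
  | cons x xs =>
    by_cases hx : x = '1'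
    · subst hx
      obtain ⟨m, r2, h1⟩ : ∃ m r2, runB xs '1' = (m, r2) := ⟨_, _, rfl⟩
      obtain ⟨c, r3, h2⟩ : ∃ c r3, runB r2 '2' = (c, r3) := ⟨_, _, rfl⟩
      obtain ⟨d, r4, h3⟩ : ∃ d r4, runB r3 '3' = (d, r4) := ⟨_, _, rfl⟩
      have hrep := runB_eq_iff '3' r3 a
      rw [h3, Prod.ext_iff] at hrep
      simp only [core, if_pos rfl]
      rw [stage2 _ _ _ (by omega), h1]
      simp only [runB, if_pos rfl, h1, h2, h3, Prod.ext_iff]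
      by_cases h4 : r4 = [] <;>
        simp [h4, Prod.ext_iff, ← hrep, h2, h3]
      rw [Bool.and_comm]
      congr 1 <;> rw [decide_eq_decide] <;> omega
    · have hr1 : runB (x :: xs) '1' = (0, x :: xs) := by simp [runB, hx]
      simp only [core, if_neg hx, hr1]
      by_cases hx2 : x = '2'
      · subst hx2
        obtain ⟨m, r, hmr⟩ : ∃ m r, runB xs '2' = (m, r) := ⟨_, _, rfl⟩
        obtain ⟨d, r4, h3⟩ : ∃ d r4, runB r '3' = (d, r4) := ⟨_, _, rfl⟩
        simp [runB, hmr, h3]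
      · have hr2 : runB (x :: xs) '2' = (0, x :: xs) := by simp [runB, hx2]
        simp only [hr2]
        by_cases hx3 : x = '3'
        · subst hx3
          obtain ⟨m, r, hmr⟩ : ∃ m r, runB xs '3' = (m, r) := ⟨_, _, rfl⟩
          simp [runB, hmr]
          omega
        · have hr3 : runB (x :: xs) '3' = (0, x :: xs) := by simp [runB, hx3]
          simp [hr3]

theorem alt_eq_altCore (s : String) : is_accepted_by_pda_alt s = altCore s.toList := rfl

-- ===== VERDICT (by name: the statement is the Claim_ definition above) =====
theorem is_accepted_by_pda_spec : Claim_equal_is_accepted_by_pda := by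
  intro s _
  unfold Spec_is_accepted_by_pda is_accepted_by_pda
  rw [loopA_counts, alt_eq_altCore]
  simpa using main_lemma s.toList
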